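-- pv_equiv track=rewrite | github.com/datapointchris/ichrisbirch | mkdocs_plugins/diagrams/analyzers/fixture_analyzer.py | analyze_fixture_categories
-- ===== SOURCE A (Python) =====
-- def analyze_fixture_categories(fixtures: dict) -> dict[str, list[str]]:
--     """Categorize fixtures based on naming patterns or usage.
--
--     Args:
--         fixtures: Dictionary of fixtures
--
--     Returns:
--         Dictionary mapping categories to lists of fixture names
--     """
--     categories: dict[str, list[str]] = {'api_clients': [], 'app_clients': [], 'database': [], 'test_data': [], 'other': []}
--
--     for name in fixtures:
--         if 'api' in name.lower() and 'client' in name.lower():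
--             categories['api_clients'].append(name)
--         elif 'app' in name.lower() and 'client' in name.lower():
--             categories['app_clients'].append(name)
--         elif any(db_term in name.lower() for db_term in ('db', 'database', 'table', 'session')):
--             categories['database'].append(name)
--         elif any(data_term in name.lower() for data_term in ('data', 'test_data', 'insert')):
--             categories['test_data'].append(name)
--         else:
--             categories['other'].append(name)
--
--     return categories
-- ===== SOURCE B (Python) =====
-- def _category(name: str) -> str:
--     """Category of a single fixture name (same priority order as the spec)."""
--     s = name.lower()
--     if 'api' in s and 'client' in s:
--         return 'api_clients'
--     if 'app' in s and 'client' in s: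
--         return 'app_clients'
--     if any(t in s for t in ('db', 'database', 'table', 'session')):
--         return 'database'
--     if any(t in s for t in ('data', 'test_data', 'insert')):
--         return 'test_data'
--     return 'other'
--
--
-- def analyze_fixture_categories(fixtures: dict) -> dict[str, list[str]]:
--     """Categorize fixtures: one filter pass per category instead of one bucket-filling loop.
--
--     Builds each category's list independently as a comprehension over the fixture
--     names; no mutable bucket dict is maintained during iteration.
--     """
--     keys = ('api_clients', 'app_clients', 'database', 'test_data', 'other')
--     return {k: [name for name in fixtures if _category(name) == k] for k in keys}
-- ===== Notes on version B (the rewrite author's own statement) =====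
-- stated objective: alternative
-- what changed: Replaces the single mutating loop that appends each name into one of five bucket lists with a staged computation: a pure per-name classifier plus one independent filter pass per category assembled by a dict comprehension (no mutable accumulator).
import Mathlib
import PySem

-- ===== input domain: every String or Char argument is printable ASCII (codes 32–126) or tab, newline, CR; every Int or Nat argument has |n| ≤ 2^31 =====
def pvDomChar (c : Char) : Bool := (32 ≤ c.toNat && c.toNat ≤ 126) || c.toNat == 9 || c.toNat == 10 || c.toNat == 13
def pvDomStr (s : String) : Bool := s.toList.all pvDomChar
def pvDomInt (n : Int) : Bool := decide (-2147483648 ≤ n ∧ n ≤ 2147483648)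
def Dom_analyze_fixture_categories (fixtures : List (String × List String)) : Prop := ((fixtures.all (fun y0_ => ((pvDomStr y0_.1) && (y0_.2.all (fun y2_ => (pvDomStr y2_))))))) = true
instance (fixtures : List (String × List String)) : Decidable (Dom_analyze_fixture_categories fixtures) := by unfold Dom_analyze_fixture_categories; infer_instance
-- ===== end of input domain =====

-- B replaces A's single mutating bucket-filling loop by a pure per-name classifier
-- plus one independent filter pass per category (alternative decomposition, same cost).

-- ===== PORT A =====
-- literal port of A: one loop, if/elif chain, 'name.lower()' recomputed per condition
def analyze_fixture_categories (fixtures : List (String × List String)) : List (String × List String) :=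
  let init : PySem.Dict String (List String) :=
    PySem.Dict.ofList [("api_clients", []), ("app_clients", []), ("database", []), ("test_data", []), ("other", [])]
  let final := fixtures.foldl (fun categories p =>
    let name := p.1
    if PySem.Str.isIn "api" (PySem.Str.lower name) && PySem.Str.isIn "client" (PySem.Str.lower name) then
      categories.modify "api_clients" [] (fun l => l ++ [name])
    else if PySem.Str.isIn "app" (PySem.Str.lower name) && PySem.Str.isIn "client" (PySem.Str.lower name) then
      categories.modify "app_clients" [] (fun l => l ++ [name])
    else if ["db", "database", "table", "session"].any (fun t => PySem.Str.isIn t (PySem.Str.lower name)) then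
      categories.modify "database" [] (fun l => l ++ [name])
    else if ["data", "test_data", "insert"].any (fun t => PySem.Str.isIn t (PySem.Str.lower name)) then
      categories.modify "test_data" [] (fun l => l ++ [name])
    else
      categories.modify "other" [] (fun l => l ++ [name])) init
  final.items

-- ===== PORT B =====
-- Source B's _category: pure classifier over the lowered name
def pvCategory (name : String) : String :=
  let s := PySem.Str.lower name
  if PySem.Str.isIn "api" s && PySem.Str.isIn "client" s then "api_clients"
  else if PySem.Str.isIn "app" s && PySem.Str.isIn "client" s then "app_clients"
  else if ["db", "database", "table", "session"].any (fun t => PySem.Str.isIn t s) then "database"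
  else if ["data", "test_data", "insert"].any (fun t => PySem.Str.isIn t s) then "test_data"
  else "other"

-- dict comprehension: one filter pass per category key
def analyze_fixture_categories_alt (fixtures : List (String × List String)) : List (String × List String) :=
  ["api_clients", "app_clients", "database", "test_data", "other"].map
    (fun k => (k, (fixtures.filter (fun p => pvCategory p.1 == k)).map (fun p => p.1)))

-- ===== PRECONDITION & SPEC =====
def Spec_analyze_fixture_categories (fixtures : List (String × List String)) (out : List (String × List String)) : Prop := out = analyze_fixture_categories_alt fixtures
instance (fixtures : List (String × List String)) (out : List (String × List String)) : Decidable (Spec_analyze_fixture_categories fixtures out) := by unfold Spec_analyze_fixture_categories; infer_instance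

-- ===== CLAIM (what is proved, stated in full; the proofs are below) =====
def Claim_equal_analyze_fixture_categories : Prop := ∀ (fixtures : List (String × List String)), Dom_analyze_fixture_categories fixtures → Spec_analyze_fixture_categories fixtures (analyze_fixture_categories fixtures)

-- ===== LEMMAS AND PROOFS =====

-- per-category filter over the fixture list
def pvBucket (k : String) (l : List (String × List String)) : List String :=
  (l.filter (fun p => pvCategory p.1 == k)).map (fun p => p.1)

theorem pvBucket_cons (k : String) (p : String × List String) (l : List (String × List String)) :
    pvBucket k (p :: l) = (if pvCategory p.1 == k then [p.1] else []) ++ pvBucket k l := by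
  simp only [pvBucket, List.filter_cons]
  split <;> simp_all

-- invariant of A's fold: each bucket is its initial content ++ that category's filter of the suffix
set_option maxHeartbeats 2000000 in
theorem pvFold_inv (l : List (String × List String)) :
    ∀ (a0 a1 a2 a3 a4 : List String),
    (List.foldl (fun categories p =>
      let name := p.1
      if PySem.Str.isIn "api" (PySem.Str.lower name) && PySem.Str.isIn "client" (PySem.Str.lower name) then
        categories.modify "api_clients" [] (fun l => l ++ [name])
      else if PySem.Str.isIn "app" (PySem.Str.lower name) && PySem.Str.isIn "client" (PySem.Str.lower name) then
        categories.modify "app_clients" [] (fun l => l ++ [name])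
      else if ["db", "database", "table", "session"].any (fun t => PySem.Str.isIn t (PySem.Str.lower name)) then
        categories.modify "database" [] (fun l => l ++ [name])
      else if ["data", "test_data", "insert"].any (fun t => PySem.Str.isIn t (PySem.Str.lower name)) then
        categories.modify "test_data" [] (fun l => l ++ [name])
      else
        categories.modify "other" [] (fun l => l ++ [name]))
      (PySem.Dict.mk [("api_clients", a0), ("app_clients", a1), ("database", a2), ("test_data", a3), ("other", a4)]) l).items
    = [("api_clients", a0 ++ pvBucket "api_clients" l), ("app_clients", a1 ++ pvBucket "app_clients" l),
       ("database", a2 ++ pvBucket "database" l), ("test_data", a3 ++ pvBucket "test_data" l),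
       ("other", a4 ++ pvBucket "other" l)] := by
  induction l with
  | nil => intro a0 a1 a2 a3 a4; simp [pvBucket]
  | cons p rest ih =>
    intro a0 a1 a2 a3 a4
    simp only [List.foldl_cons]
    split_ifs with h1 h2 h3 h4 <;>
    · refine Eq.trans (ih _ _ _ _ _) ?_
      simp_all [pvBucket_cons, pvCategory, List.append_assoc, PySem.Dict.getD, PySem.Dict.get?]
      all_goals split_ifs <;> simp_all

-- ===== VERDICT (by name: the statement is the Claim_ definition above) =====
theorem analyze_fixture_categories_spec : Claim_equal_analyze_fixture_categories := by
  intro fixtures _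
  unfold Spec_analyze_fixture_categories analyze_fixture_categories analyze_fixture_categories_alt
  simpa [pvBucket] using pvFold_inv fixtures [] [] [] [] []
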